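-- pv_equiv track=rewrite | github.com/Omega97/google_hash | example/sample_algorithms.py | alg_1
-- ===== SOURCE A (Python) =====
-- def alg_1(problem):
--     out = []
--     v = []
--     for i in range(len(problem)):
--         if problem[i][0] == 'H':
--             out += [[i]]
--         else:
--             v += [i]
--             if len(v) == 2:
--                 out += [v]
--                 v = []
--     return out
-- ===== SOURCE B (Python) =====
-- def _pairs(v):
--     return [(v[k], v[k + 1]) for k in range(0, len(v) - 1, 2)]
--
--
-- def alg_1(problem):
--     vs = [i for i, s in enumerate(problem) if s[0] != 'H']
--     pair_of = dict((b, a) for a, b in _pairs(vs))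
--     return [[i] if s[0] == 'H' else [pair_of[i], i]
--             for i, s in enumerate(problem)
--             if s[0] == 'H' or i in pair_of]
-- ===== Notes on version B (the rewrite author's own statement) =====
-- stated objective: alternative
-- what changed: Replaces the single stateful pass (running pending-V buffer) by a two-phase plan: collect all V indices, pair them into a completion dict keyed by each pair's second index, then emit groups in one comprehension over enumerate; Pre_ only excludes inputs containing an empty string, on which both A and B raise IndexError.
import Mathlib
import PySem

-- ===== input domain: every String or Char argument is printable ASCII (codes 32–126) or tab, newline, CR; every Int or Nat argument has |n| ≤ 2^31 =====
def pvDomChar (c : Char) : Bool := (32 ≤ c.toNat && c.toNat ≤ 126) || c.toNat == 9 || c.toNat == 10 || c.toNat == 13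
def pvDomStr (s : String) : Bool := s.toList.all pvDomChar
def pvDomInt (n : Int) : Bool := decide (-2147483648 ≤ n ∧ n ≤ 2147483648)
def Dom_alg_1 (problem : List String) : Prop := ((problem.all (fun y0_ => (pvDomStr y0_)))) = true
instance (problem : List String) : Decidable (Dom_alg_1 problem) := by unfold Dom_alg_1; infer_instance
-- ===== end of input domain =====

-- B replaces A's single stateful pass (pending-V buffer) by a two-phase plan: pair up all V
-- indices first, then emit groups in one comprehension; same O(n) cost, different decomposition.

-- s[0] == 'H' (IndexError on "" → none; Pre_ excludes empty strings)
def isH (s : String) : Bool := PySem.Str.pyGet? s 0 == some 'H'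

-- ===== PORT A =====
def alg1Step (problem : List String) (st : List (List Int) × List Int) (i : Int) :
    List (List Int) × List Int :=
  let s := PySem.List.pyGetD problem i ""
  if isH s then (st.1 ++ [[i]], st.2)
  else
    let v := st.2 ++ [i]
    if v.length == 2 then (st.1 ++ [v], []) else (st.1, v)

def alg_1 (problem : List String) : List (List Int) :=
  ((PySem.List.pyRange 0 (PySem.List.len problem) 1).foldl (alg1Step problem) ([], [])).1

-- ===== PORT B =====
-- _pairs(v) of Source B: [(v[k], v[k+1]) for k in range(0, len(v) - 1, 2)]
def pairsOf (v : List Int) : List (Int × Int) :=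
  (PySem.List.pyRange 0 (PySem.List.len v - 1) 2).map
    (fun k => (PySem.List.pyGetD v k 0, PySem.List.pyGetD v (k + 1) 0))

-- vs of Source B: the V indices, in order
def bVs (problem : List String) : List Int :=
  ((PySem.List.enumerate problem 0).filter (fun p => !(isH p.2))).map (·.1)

-- pair_of of Source B: dict((b, a) for a, b in _pairs(vs))
def bPairOf (problem : List String) : PySem.Dict Int Int :=
  PySem.Dict.ofList ((pairsOf (bVs problem)).map (fun ab => (ab.2, ab.1)))

def alg_1_alt (problem : List String) : List (List Int) :=
  (PySem.List.enumerate problem 0).filterMap (fun p =>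
    if isH p.2 then some [p.1]
    else if (bPairOf problem).contains p.1 then
      some [(bPairOf problem).getD p.1 0, p.1]
    else none)

-- ===== PRECONDITION & SPEC =====
-- Pre_ excludes inputs containing an empty string: there both A and B raise IndexError (s[0]).
def Pre_alg_1 (problem : List String) : Prop := ∀ s ∈ problem, s ≠ ""
instance (problem : List String) : Decidable (Pre_alg_1 problem) := by
  unfold Pre_alg_1; infer_instance

def pvWitness_alg_1 : List String := ["H", "V", "V"]

def Spec_alg_1 (problem : List String) (out : List (List Int)) : Prop := out = alg_1_alt problem
instance (problem : List String) (out : List (List Int)) : Decidable (Spec_alg_1 problem out) := by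
  unfold Spec_alg_1; infer_instance

-- ===== CLAIM (what is proved, stated in full; the proofs are below) =====
def Claim_equal_alg_1 : Prop :=
  ∀ (problem : List String), Dom_alg_1 problem → Pre_alg_1 problem →
    Spec_alg_1 problem (alg_1 problem)

-- ===== LEMMAS AND PROOFS =====

-- structural reading of _pairs: consecutive disjoint pairs
def pairUp : List Int → List (Int × Int)
  | a :: b :: t => (a, b) :: pairUp t
  | _ => []

theorem pairsOf_eq_pairUp : ∀ v : List Int, pairsOf v = pairUp v
  | [] => by
      unfold pairsOf pairUp
      rw [PySem.List.pyRange_of_pos _ _ (by norm_num : (0:Int) < 2)]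
      simp
  | [a] => by
      unfold pairsOf pairUp
      rw [PySem.List.pyRange_of_pos _ _ (by norm_num : (0:Int) < 2)]
      simp
  | a :: b :: t => by
      have ht := pairsOf_eq_pairUp t
      unfold pairsOf pairUp
      unfold pairsOf at ht
      rw [PySem.List.pyRange_of_pos _ _ (by norm_num : (0:Int) < 2)] at ht ⊢
      have hcnt : (if (0:Int) < PySem.List.len (a :: b :: t) - 1 then
          ((PySem.List.len (a :: b :: t) - 1 - 0 + 2 - 1) / 2).toNat else 0)
          = t.length / 2 + 1 := by
        have : (PySem.List.len (a :: b :: t) : Int) = (t.length : Int) + 2 := by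
          simp; omega
        rw [this]
        rw [if_pos (by omega)]
        omega
      have hcnt' : (if (0:Int) < PySem.List.len t - 1 then
          ((PySem.List.len t - 1 - 0 + 2 - 1) / 2).toNat else 0) = t.length / 2 := by
        have : (PySem.List.len t : Int) = (t.length : Int) := by simp
        rw [this]
        split <;> omega
      rw [hcnt]
      rw [hcnt'] at ht
      rw [List.range_succ_eq_map, List.map_cons]
      refine congrArg₂ List.cons ?_ ?_
      · show (PySem.List.pyGetD (a :: b :: t) (0 + 2 * ((0:Nat):Int)) 0,
              PySem.List.pyGetD (a :: b :: t) (0 + 2 * ((0:Nat):Int) + 1) 0) = (a, b)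
        rw [show (0 + 2 * ((0:Nat):Int)) = ((0:Nat):Int) from by norm_num,
            show (((0:Nat):Int) + 1) = ((1:Nat):Int) from by norm_num,
            PySem.List.pyGetD_natCast, PySem.List.pyGetD_natCast]
        rfl
      · rw [← ht]
        simp only [List.map_map]
        apply List.map_congr_left
        intro k _
        show (PySem.List.pyGetD (a :: b :: t) (0 + 2 * ((Nat.succ k : Nat):Int)) 0,
              PySem.List.pyGetD (a :: b :: t) (0 + 2 * ((Nat.succ k : Nat):Int) + 1) 0)
            = (PySem.List.pyGetD t (0 + 2 * ((k:Nat):Int)) 0,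
               PySem.List.pyGetD t (0 + 2 * ((k:Nat):Int) + 1) 0)
        rw [show (0 + 2 * ((Nat.succ k : Nat):Int)) = ((2 * k + 2 : Nat):Int) from by push_cast; ring,
            show (((2 * k + 2 : Nat):Int) + 1) = ((2 * k + 3 : Nat):Int) from by push_cast; ring,
            show (0 + 2 * ((k:Nat):Int)) = ((2 * k : Nat):Int) from by push_cast; ring,
            show (((2 * k : Nat):Int) + 1) = ((2 * k + 1 : Nat):Int) from by push_cast; ring,
            PySem.List.pyGetD_natCast, PySem.List.pyGetD_natCast,
            PySem.List.pyGetD_natCast, PySem.List.pyGetD_natCast]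
        rw [show 2 * k + 2 = (2 * k) + 1 + 1 from by ring,
            show (2 * k) + 1 + 1 + 1 = (2 * k + 1) + 1 + 1 from by ring]
        simp

-- flag stream of the input: (index, first char is 'H')
def flagsOf (problem : List String) : List (Int × Bool) :=
  (PySem.List.enumerate problem 0).map (fun p => (p.1, isH p.2))

-- reference recursion: A's loop body on the flag stream, pending buffer v
def specG : List (Int × Bool) → List Int → List (List Int)
  | [], _ => []
  | (i, true) :: r, v => [i] :: specG r v
  | (i, false) :: r, v =>
      if (v ++ [i]).length == 2 then (v ++ [i]) :: specG r [] else specG r (v ++ [i])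

def stepF (st : List (List Int) × List Int) (p : Int × Bool) : List (List Int) × List Int :=
  if p.2 then (st.1 ++ [[p.1]], st.2)
  else
    let v := st.2 ++ [p.1]
    if v.length == 2 then (st.1 ++ [v], []) else (st.1, v)

def vsOf (fl : List (Int × Bool)) : List Int := (fl.filter (fun p => !p.2)).map (·.1)

def lookupSec (q : List (Int × Int)) (i : Int) : Option Int :=
  (q.find? (fun ab => ab.2 == i)).map (·.1)

def dgen (fl : List (Int × Bool)) (q : List (Int × Int)) : List (List Int) :=
  fl.filterMap (fun p =>
    if p.2 then some [p.1] else (lookupSec q p.1).map (fun a => [a, p.1]))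

theorem foldl_stepF (fl : List (Int × Bool)) :
    ∀ (out : List (List Int)) (v : List Int),
      (fl.foldl stepF (out, v)).1 = out ++ specG fl v := by
  induction fl with
  | nil => intro out v; simp [specG]
  | cons p r ih =>
      intro out v
      obtain ⟨i, b⟩ := p
      cases b with
      | true => simp [stepF, specG, ih]
      | false =>
          by_cases h2 : v.length = 1
          · simp [stepF, specG, h2, ih]
          · simp [stepF, specG, h2, ih]

theorem alg_1_eq_specG (problem : List String) :
    alg_1 problem = specG (flagsOf problem) [] := by
  have h := foldl_stepF (flagsOf problem) [] []
  simp only [List.nil_append] at h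
  rw [← h]
  unfold alg_1 flagsOf
  rw [PySem.List.enumerate_eq_map_pyRange (d := "")]
  rw [List.map_map, List.foldl_map]
  rfl

theorem pairUp_mem (l : List Int) (h : l.Pairwise (· < ·)) :
    ∀ ab ∈ pairUp l, ab.1 ∈ l ∧ ab.2 ∈ l ∧ ab.1 < ab.2 := by
  fun_induction pairUp l with
  | case1 a b t ih =>
      rw [List.pairwise_cons] at h
      obtain ⟨ha, h⟩ := h
      rw [List.pairwise_cons] at h
      obtain ⟨hb, h⟩ := h
      intro ab hab
      rcases List.mem_cons.mp hab with rfl | hab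
      · exact ⟨by simp, by simp, ha b (by simp)⟩
      · obtain ⟨h1, h2, h3⟩ := ih h ab hab
        exact ⟨by simp [h1], by simp [h2], h3⟩
  | case2 l h2 => simp

theorem pairUp_sec_pairwise (l : List Int) (h : l.Pairwise (· < ·)) :
    ((pairUp l).map (·.2)).Pairwise (· < ·) := by
  fun_induction pairUp l with
  | case1 a b t ih =>
      rw [List.pairwise_cons] at h
      obtain ⟨ha, h⟩ := h
      rw [List.pairwise_cons] at h
      obtain ⟨hb, h⟩ := h
      simp only [List.map_cons, List.pairwise_cons]
      refine ⟨?_, ih h⟩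
      intro y hy
      obtain ⟨ab, hab, rfl⟩ := List.mem_map.mp hy
      exact hb ab.2 (pairUp_mem t h ab hab).2.1
  | case2 l h2 => simp

theorem vsOf_sublist (fl : List (Int × Bool)) : (vsOf fl).Sublist (fl.map (·.1)) := by
  unfold vsOf
  exact List.Sublist.map _ List.filter_sublist

-- the Dict of Source B looked up through the pair list, under distinct second components
theorem dict_lookup (pm : List (Int × Int)) (hnd : (pm.map (·.2)).Nodup) (i : Int) :
    (PySem.Dict.ofList (pm.map (fun ab => (ab.2, ab.1)))).get? i = lookupSec pm i := by
  induction pm with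
  | nil => rfl
  | cons ab q ih =>
      simp only [List.map_cons, List.nodup_cons] at hnd
      obtain ⟨hab, hq⟩ := hnd
      have hitems : (PySem.Dict.ofList ((ab :: q).map (fun ab => (ab.2, ab.1)))).items
          = (ab :: q).map (fun ab => (ab.2, ab.1)) := by
        have := PySem.Dict.items_foldl_insert_fresh
          (l := (ab :: q).map (fun ab => (ab.2, ab.1))) (k := (·.1)) (v := (·.2))
          (d := PySem.Dict.empty)
          (by intro a _; rfl)
          (by simpa [List.map_map, Function.comp] using (List.nodup_cons.mpr ⟨hab, hq⟩))
        simpa using this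
      have hq_items : (PySem.Dict.ofList (q.map (fun ab => (ab.2, ab.1)))).items
          = q.map (fun ab => (ab.2, ab.1)) := by
        have := PySem.Dict.items_foldl_insert_fresh
          (l := q.map (fun ab => (ab.2, ab.1))) (k := (·.1)) (v := (·.2))
          (d := PySem.Dict.empty)
          (by intro a _; rfl)
          (by simpa [List.map_map, Function.comp] using hq)
        simpa using this
      have h1 : PySem.Dict.ofList ((ab :: q).map (fun ab => (ab.2, ab.1)))
          = PySem.Dict.mk ((ab.2, ab.1) :: q.map (fun ab => (ab.2, ab.1))) := by
        apply PySem.Dict.ext; simpa using hitems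
      have h2 : PySem.Dict.ofList (q.map (fun ab => (ab.2, ab.1)))
          = PySem.Dict.mk (q.map (fun ab => (ab.2, ab.1))) := by
        apply PySem.Dict.ext; simpa using hq_items
      rw [h1, PySem.Dict.get?_mk_cons]
      by_cases he : (ab.2 == i) = true
      · rw [if_pos he]
        simp [lookupSec, he]
      · rw [if_neg he]
        have hfind : lookupSec (ab :: q) i = lookupSec q i := by
          simp [lookupSec, he]
        rw [hfind, ← ih hq, h2]

theorem flags_pairwise (problem : List String) :
    ((flagsOf problem).map (·.1)).Pairwise (· < ·) := by
  unfold flagsOf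
  rw [List.map_map]
  have := PySem.List.pairwise_lt_enumerate (xs := problem) (s := 0)
  exact List.pairwise_map.mpr (by simpa [Function.comp] using this)

theorem vsOf_pairwise (problem : List String) :
    (vsOf (flagsOf problem)).Pairwise (· < ·) :=
  List.Pairwise.sublist (vsOf_sublist _) (flags_pairwise problem)

theorem port_b_eq_dgen (problem : List String) :
    alg_1_alt problem = dgen (flagsOf problem) (pairUp (vsOf (flagsOf problem))) := by
  have hnd : ((pairUp (vsOf (flagsOf problem))).map (·.2)).Nodup :=
    List.Pairwise.imp (fun h => ne_of_lt h) (pairUp_sec_pairwise _ (vsOf_pairwise problem))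
  have hvs : bVs problem = vsOf (flagsOf problem) := by
    unfold bVs vsOf flagsOf
    rw [List.filter_map, List.map_map]
    rfl
  unfold alg_1_alt dgen flagsOf
  rw [List.filterMap_map]
  apply List.filterMap_congr
  intro p _
  show (if isH p.2 = true then some [p.1]
      else if (bPairOf problem).contains p.1 = true then
        some [(bPairOf problem).getD p.1 0, p.1]
      else none)
    = (if isH p.2 = true then some [p.1]
      else (lookupSec (pairUp (vsOf (flagsOf problem))) p.1).map (fun a => [a, p.1]))
  by_cases hH : isH p.2
  · simp [hH]
  · simp only [hH, if_false, Bool.false_eq_true]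
    have hg := dict_lookup (pairUp (vsOf (flagsOf problem))) hnd p.1
    have hbp : (bPairOf problem).get? p.1 = lookupSec (pairUp (vsOf (flagsOf problem))) p.1 := by
      unfold bPairOf; rw [pairsOf_eq_pairUp, hvs]; exact hg
    cases hlk : lookupSec (pairUp (vsOf (flagsOf problem))) p.1 with
    | none =>
        have hc : (bPairOf problem).contains p.1 = false := by
          rw [PySem.Dict.contains_eq_isSome_get?, hbp, hlk]; rfl
        simp [hc]
    | some a =>
        have hc : (bPairOf problem).contains p.1 = true := by
          rw [PySem.Dict.contains_eq_isSome_get?, hbp, hlk]; rfl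
        have hgd : (bPairOf problem).getD p.1 0 = a := by
          rw [PySem.Dict.getD_eq_get?_getD, hbp, hlk]; rfl
        simp [hc, hgd]

theorem dgen_cons_true (i : Int) (r : List (Int × Bool)) (q : List (Int × Int)) :
    dgen ((i, true) :: r) q = [i] :: dgen r q := by simp [dgen]

theorem dgen_cons_false_none (i : Int) (r : List (Int × Bool)) (q : List (Int × Int))
    (h : lookupSec q i = none) : dgen ((i, false) :: r) q = dgen r q := by
  simp [dgen, h]

theorem dgen_cons_false_some (i a : Int) (r : List (Int × Bool)) (q : List (Int × Int))
    (h : lookupSec q i = some a) : dgen ((i, false) :: r) q = [a, i] :: dgen r q := by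
  simp [dgen, h]

theorem spec_eq_dgen (fl : List (Int × Bool)) :
    ∀ v : List Int, v.length ≤ 1 → ((v ++ fl.map (·.1)).Pairwise (· < ·)) →
      specG fl v = dgen fl (pairUp (v ++ vsOf fl)) := by
  induction fl with
  | nil => intro v _ _; simp [specG, dgen]
  | cons p r ih =>
    intro v hv hpw
    obtain ⟨i, b⟩ := p
    cases b with
    | true =>
        have hsub : (v ++ r.map (·.1)).Sublist (v ++ ((i, true) :: r).map (·.1)) :=
          List.Sublist.append (List.Sublist.refl v) (by simp)
        have hr := ih v hv (List.Pairwise.sublist hsub hpw)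
        have hvsOf : vsOf ((i, true) :: r) = vsOf r := by simp [vsOf]
        rw [hvsOf, specG, dgen_cons_true, hr]
    | false =>
        have hvsOf : vsOf ((i, false) :: r) = i :: vsOf r := by simp [vsOf]
        match v, hv with
        | [], _ =>
            simp only [List.nil_append, List.map_cons] at hpw
            have hchain : (i :: vsOf r).Pairwise (· < ·) :=
              List.Pairwise.sublist (List.Sublist.cons₂ i (vsOf_sublist r)) hpw
            have hlk : lookupSec (pairUp (i :: vsOf r)) i = none := by
              unfold lookupSec
              rw [List.find?_eq_none.mpr]
              · rfl
              · intro ab hab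
                obtain ⟨h1, _, h3⟩ := pairUp_mem _ hchain ab hab
                simp only [beq_iff_eq]
                intro he
                rw [he] at h3
                rcases List.mem_cons.mp h1 with rfl | h1
                · exact lt_irrefl _ h3
                · rw [List.pairwise_cons] at hchain
                  exact absurd h3 (not_lt_of_gt (hchain.1 _ h1))
            have hr := ih [i] (by simp) (by simpa using hpw)
            rw [specG]
            rw [if_neg (by simp)]
            simp only [List.nil_append, hvsOf]
            rw [dgen_cons_false_none _ _ _ hlk]
            simpa using hr
        | [a], _ =>
            simp only [List.cons_append, List.nil_append, List.map_cons] at hpw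
            rw [List.pairwise_cons] at hpw
            obtain ⟨ha, hpwi⟩ := hpw
            have hpwi' := hpwi
            rw [List.pairwise_cons] at hpwi'
            obtain ⟨hi, hrp⟩ := hpwi'
            have hq : pairUp ([a] ++ vsOf ((i, false) :: r)) = (a, i) :: pairUp (vsOf r) := by
              rw [hvsOf]; rfl
            have hlk : lookupSec ((a, i) :: pairUp (vsOf r)) i = some a := by
              simp [lookupSec]
            have hcongr : dgen r ((a, i) :: pairUp (vsOf r)) = dgen r (pairUp (vsOf r)) := by
              unfold dgen
              apply List.filterMap_congr
              intro p hp
              by_cases hb : p.2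
              · simp [hb]
              · have hip : i < p.1 := hi p.1 (List.mem_map.mpr ⟨p, hp, rfl⟩)
                have hne : ((a, i).2 == p.1) = false := by
                  simp only [beq_eq_false_iff_ne, ne_eq]
                  exact fun h => absurd (h ▸ hip) (lt_irrefl _)
                simp [hb, lookupSec, hne]
            have hr := ih [] (by simp) (by
              exact List.Pairwise.sublist
                ((List.nil_sublist [a]).append (List.sublist_cons_self _ _)) (by
                  simpa using And.intro ha hpwi))
            rw [specG]
            rw [if_pos (by simp)]
            rw [hq, dgen_cons_false_some _ _ _ _ hlk, hcongr]
            simpa using hr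

-- ===== VERDICT (by name: the statement is the Claim_ definition above) =====
theorem alg_1_spec : Claim_equal_alg_1 := by
  intro problem _ _
  unfold Spec_alg_1
  rw [alg_1_eq_specG, port_b_eq_dgen]
  have hpw : ((flagsOf problem).map (·.1)).Pairwise (· < ·) := by
    unfold flagsOf
    rw [List.map_map]
    have := PySem.List.pairwise_lt_enumerate (xs := problem) (s := 0)
    exact List.pairwise_map.mpr (by simpa [Function.comp] using this)
  have := spec_eq_dgen (flagsOf problem) [] (by simp) (by simpa using hpw)
  simpa using this
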